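-- pv_equiv track=rewrite | github.com/Louis-de-Bontin/P04_chess_tournament | model/rounds.py | check_if_already_played_together
-- ===== SOURCE A (Python) =====
-- def check_if_already_played_together(match, matchs_played):
--     match_to_check = (match[0][0][0], match[1][0][0])
--     matchs_to_compare = []
--     already_played = False
--     for match in matchs_played:
--         matchs_to_compare.append((match[0][0][0], match[1][0][0]))
--     for match in matchs_to_compare:
--         if (
--             match_to_check[0] == match[0] and
--             match_to_check[1] == match[1]
--         ) or (
--             match_to_check[1] == match[0] and
--             match_to_check[0] == match[1]
--         ):
--             already_played = True
--     return already_played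
-- ===== SOURCE B (Python) =====
-- def check_if_already_played_together(match, matchs_played):
--     a, b = match[0][0][0], match[1][0][0]
--     lo, hi = (a, b) if a <= b else (b, a)
--
--     def scan(ms):
--         if not ms:
--             return False
--         m = ms[0]
--         x, y = m[0][0][0], m[1][0][0]
--         if min(x, y) == lo and max(x, y) == hi:
--             return True
--         return scan(ms[1:])
--
--     return scan(matchs_played)
-- ===== Notes on version B (the rewrite author's own statement) =====
-- stated objective: alternative
-- what changed: A builds an intermediate pair list and then latch-scans it with a symmetric two-way OR comparison; B is a single recursive pass with early return that normalizes each pair to (min,max) once and compares normalized keys, with no intermediate list and no symmetry case split.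
import Mathlib
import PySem

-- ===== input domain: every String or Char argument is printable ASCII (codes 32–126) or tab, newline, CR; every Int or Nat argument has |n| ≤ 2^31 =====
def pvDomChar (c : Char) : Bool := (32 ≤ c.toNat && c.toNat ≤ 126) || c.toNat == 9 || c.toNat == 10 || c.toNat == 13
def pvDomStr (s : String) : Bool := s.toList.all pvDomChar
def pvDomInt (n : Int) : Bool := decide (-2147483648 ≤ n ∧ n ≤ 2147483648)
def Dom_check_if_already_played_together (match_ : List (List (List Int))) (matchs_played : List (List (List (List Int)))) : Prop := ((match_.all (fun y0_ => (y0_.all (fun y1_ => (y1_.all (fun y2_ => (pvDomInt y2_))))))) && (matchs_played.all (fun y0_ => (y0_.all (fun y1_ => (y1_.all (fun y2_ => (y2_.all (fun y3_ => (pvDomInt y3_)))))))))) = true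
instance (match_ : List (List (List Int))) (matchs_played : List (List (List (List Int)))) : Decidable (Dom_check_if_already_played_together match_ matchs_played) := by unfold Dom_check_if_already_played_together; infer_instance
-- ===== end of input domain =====

-- B replaces A's staged passes (build a pair list, then latch-scan with a symmetric OR) by one
-- recursive early-return pass comparing (min,max)-normalized pairs (alternative decomposition).


-- shared helper: m[i][0][0] (total via getD; Pre_ excludes exactly the inputs where Python raises IndexError)
def pvPlayerId (m : List (List (List Int))) (i : Int) : Int :=
  (PySem.List.pyGet? ((PySem.List.pyGet? ((PySem.List.pyGet? m i).getD []) 0).getD []) 0).getD 0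

-- ===== PORT A =====
def check_if_already_played_together (match_ : List (List (List Int))) (matchs_played : List (List (List (List Int)))) : Bool :=
  let match_to_check : Int × Int := (pvPlayerId match_ 0, pvPlayerId match_ 1)
  let matchs_to_compare : List (Int × Int) :=
    matchs_played.foldl (fun acc m => acc ++ [(pvPlayerId m 0, pvPlayerId m 1)]) []
  matchs_to_compare.foldl (fun already_played m =>
    if (match_to_check.1 == m.1 && match_to_check.2 == m.2) ||
       (match_to_check.2 == m.1 && match_to_check.1 == m.2) then true else already_played) false

-- ===== PORT B =====
-- B's recursive early-return scan: stops at the first match whose (min,max) key equals (lo, hi)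
def pvScan (lo hi : Int) : List (List (List (List Int))) → Bool
  | [] => false
  | m :: ms =>
      let x := pvPlayerId m 0
      let y := pvPlayerId m 1
      if min x y == lo && max x y == hi then true else pvScan lo hi ms

def check_if_already_played_together_alt (match_ : List (List (List Int))) (matchs_played : List (List (List (List Int)))) : Bool :=
  let a := pvPlayerId match_ 0
  let b := pvPlayerId match_ 1
  let p : Int × Int := if a ≤ b then (a, b) else (b, a)
  pvScan p.1 p.2 matchs_played

-- ===== PRECONDITION & SPEC =====
-- shape of a match on which m[0][0][0] and m[1][0][0] do not raise IndexError
def pvHasIds (m : List (List (List Int))) : Bool :=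
  match m with
  | ((_ :: _) :: _) :: ((_ :: _) :: _) :: _ => true
  | _ => false

-- Pre_ excludes exactly the inputs on which Python A raises IndexError (a match without two
-- players each carrying an id); A returns on every input Pre_ admits.
def Pre_check_if_already_played_together (match_ : List (List (List Int))) (matchs_played : List (List (List (List Int)))) : Prop :=
  pvHasIds match_ = true ∧ ∀ m ∈ matchs_played, pvHasIds m = true
instance (match_ : List (List (List Int))) (matchs_played : List (List (List (List Int)))) : Decidable (Pre_check_if_already_played_together match_ matchs_played) := by unfold Pre_check_if_already_played_together; infer_instance

def pvWitness_check_if_already_played_together : List (List (List Int)) × List (List (List (List Int))) :=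
  ([[[1]], [[2]]], [[[[2]], [[1]]], [[[3]], [[4]]]])

def Spec_check_if_already_played_together (match_ : List (List (List Int))) (matchs_played : List (List (List (List Int)))) (out : Bool) : Prop := out = check_if_already_played_together_alt match_ matchs_played
instance (match_ : List (List (List Int))) (matchs_played : List (List (List (List Int)))) (out : Bool) : Decidable (Spec_check_if_already_played_together match_ matchs_played out) := by unfold Spec_check_if_already_played_together; infer_instance

-- ===== CLAIM (what is proved, stated in full; the proofs are below) =====
def Claim_equal_check_if_already_played_together : Prop := ∀ (match_ : List (List (List Int))) (matchs_played : List (List (List (List Int)))), Dom_check_if_already_played_together match_ matchs_played → Pre_check_if_already_played_together match_ matchs_played → Spec_check_if_already_played_together match_ matchs_played (check_if_already_played_together match_ matchs_played)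

-- ===== LEMMAS AND PROOFS =====

-- A's second loop: latching a flag over a list is List.any
theorem pvFoldl_latch {α : Type} (c : α → Bool) (l : List α) (acc : Bool) :
    l.foldl (fun b x => if c x then true else b) acc = (acc || l.any c) := by
  induction l generalizing acc with
  | nil => simp
  | cons x xs ih =>
    simp only [List.foldl_cons, List.any_cons, ih]
    by_cases h : c x = true <;> simp [h]

-- B's early-return recursion is List.any of the normalized comparison
theorem pvScan_eq_any (lo hi : Int) (l : List (List (List (List Int)))) :
    pvScan lo hi l = l.any (fun m => min (pvPlayerId m 0) (pvPlayerId m 1) == lo &&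
                                     max (pvPlayerId m 0) (pvPlayerId m 1) == hi) := by
  induction l with
  | nil => rfl
  | cons m ms ih =>
    simp only [pvScan, List.any_cons, ih]
    by_cases h : (min (pvPlayerId m 0) (pvPlayerId m 1) == lo &&
                  max (pvPlayerId m 0) (pvPlayerId m 1) == hi) = true <;> simp [h]

-- A's symmetric two-way comparison agrees with B's normalized-pair comparison
theorem pvSym_iff (a b c d : Int) :
    (((a == c) && (b == d)) || ((b == c) && (a == d))) =
      (min c d == (if a ≤ b then (a, b) else (b, a)).1 &&
       max c d == (if a ≤ b then (a, b) else (b, a)).2) := by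
  by_cases h : a ≤ b <;> simp only [h, if_true, if_false] <;>
    rw [Bool.eq_iff_iff] <;> simp [min_def, max_def] <;> omega

-- ===== VERDICT (by name: the statement is the Claim_ definition above) =====
theorem check_if_already_played_together_spec : Claim_equal_check_if_already_played_together := by
  intro match_ matchs_played _ _
  unfold Spec_check_if_already_played_together
  unfold check_if_already_played_together check_if_already_played_together_alt
  simp only [PySem.List.foldl_append_singleton_eq_map, pvFoldl_latch, Bool.false_or,
    pvScan_eq_any, List.nil_append, List.any_map]
  congr 1
  funext m
  exact pvSym_iff (pvPlayerId match_ 0) (pvPlayerId match_ 1) (pvPlayerId m 0) (pvPlayerId m 1)
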